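-- pv_equiv track=rewrite | github.com/evilseanbot/BallOfHate | findFriendlyGroups.py | getUnconflictedGroup
-- ===== SOURCE A (Python) =====
-- import copy
--
-- def getEnemies(person, enemies):
--     myEnemies = []
--     for j in range(len(enemies)):
--         if enemies[j][0] == person:
--             myEnemies.append(enemies[j][1])
--         elif enemies[j][1] == person:
--             myEnemies.append(enemies[j][0])
--
--     return myEnemies
--
-- def getUnconflictedGroup(group, enemies):
--     unconflictedGroup = copy.copy(group)
--     for i in group:
--         for j in group:
--             if j in getEnemies(i, enemies):
--                 if j in unconflictedGroup:
--                     unconflictedGroup.remove(j)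
--     return unconflictedGroup
-- ===== SOURCE B (Python) =====
-- def getUnconflictedGroup(group, enemies):
--     members = set(group)
--     conflicted = set()
--     for e in enemies:
--         a, b = e[0], e[1]
--         if a in members and b in members:
--             conflicted.add(a)
--             conflicted.add(b)
--     return [x for x in group if x not in conflicted]
-- ===== Notes on version B (the rewrite author's own statement) =====
-- stated objective: alternative
-- what changed: Replaces A's group-by-group double loop (which rebuilds the full per-person enemies list for every member pair and removes hits one list.remove at a time) with a single pass over the edges building a 'conflicted' set followed by one filter pass over the group; A is O(|group|^2*|enemies|), B O(|group|+|enemies|), though a timing run could not measure this run.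
import Mathlib
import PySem

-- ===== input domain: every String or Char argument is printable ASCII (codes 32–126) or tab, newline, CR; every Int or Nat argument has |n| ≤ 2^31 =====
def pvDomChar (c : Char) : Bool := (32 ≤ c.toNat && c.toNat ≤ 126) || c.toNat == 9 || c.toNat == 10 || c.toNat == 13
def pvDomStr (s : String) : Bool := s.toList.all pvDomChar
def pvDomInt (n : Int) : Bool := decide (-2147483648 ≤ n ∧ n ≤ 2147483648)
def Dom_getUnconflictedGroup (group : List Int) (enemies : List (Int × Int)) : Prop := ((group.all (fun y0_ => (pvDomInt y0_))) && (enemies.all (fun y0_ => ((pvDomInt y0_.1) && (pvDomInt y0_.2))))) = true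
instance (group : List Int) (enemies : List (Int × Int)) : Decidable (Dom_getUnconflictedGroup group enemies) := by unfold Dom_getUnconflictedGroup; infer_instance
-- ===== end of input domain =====

-- B replaces A's quadratic member-pair scan (rebuilding the enemies-of list per pair and list.remove per hit)
-- with one pass over the edges building a conflicted set plus one filter pass over the group (alternative algorithm).

-- ===== PORT A =====
def getEnemiesA (person : Int) (enemies : List (Int × Int)) : List Int :=
  enemies.foldl (fun myEnemies e =>
    if e.1 == person then myEnemies ++ [e.2]
    else if e.2 == person then myEnemies ++ [e.1]
    else myEnemies) []

def getUnconflictedGroup (group : List Int) (enemies : List (Int × Int)) : List Int :=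
  group.foldl (fun u i =>
    group.foldl (fun u j =>
      if (getEnemiesA i enemies).contains j then
        if u.contains j then (PySem.List.remove? u j).getD u else u
      else u) u) group

-- ===== PORT B =====
def getUnconflictedGroup_alt (group : List Int) (enemies : List (Int × Int)) : List Int :=
  let members := PySem.Set.ofList group
  let conflicted := enemies.foldl (fun c e =>
    if PySem.Set.contains members e.1 && PySem.Set.contains members e.2 then
      PySem.Set.add (PySem.Set.add c e.1) e.2
    else c) PySem.Set.empty
  group.filter (fun x => !(PySem.Set.contains conflicted x))

-- ===== PRECONDITION & SPEC =====
def Spec_getUnconflictedGroup (group : List Int) (enemies : List (Int × Int)) (out : List Int) : Prop := out = getUnconflictedGroup_alt group enemies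
instance (group : List Int) (enemies : List (Int × Int)) (out : List Int) : Decidable (Spec_getUnconflictedGroup group enemies out) := by unfold Spec_getUnconflictedGroup; infer_instance

-- ===== CLAIM (what is proved, stated in full; the proofs are below) =====
def Claim_equal_getUnconflictedGroup : Prop := ∀ (group : List Int) (enemies : List (Int × Int)), Dom_getUnconflictedGroup group enemies → Spec_getUnconflictedGroup group enemies (getUnconflictedGroup group enemies)

-- ===== LEMMAS AND PROOFS =====

-- membership in A's per-person enemies list
theorem mem_getEnemiesA_aux (v i : Int) : ∀ (es : List (Int × Int)) (acc : List Int),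
    v ∈ es.foldl (fun myEnemies e =>
      if e.1 == i then myEnemies ++ [e.2]
      else if e.2 == i then myEnemies ++ [e.1]
      else myEnemies) acc
    ↔ v ∈ acc ∨ ∃ e ∈ es, (e.1 = i ∧ e.2 = v) ∨ (e.2 = i ∧ e.1 = v) := by
  intro es
  induction es with
  | nil => simp
  | cons e rest ih =>
    intro acc
    simp only [List.foldl_cons, ih, List.mem_cons]
    by_cases h1 : e.1 = i <;> by_cases h2 : e.2 = i <;> simp [h1, h2] <;> aesop

-- erasing an element the filter drops anyway does not change the filter
theorem filter_erase_of_not (p : Int → Bool) (j : Int) (u : List Int) (hj : p j = false) :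
    (u.erase j).filter p = u.filter p := by
  induction u with
  | nil => simp
  | cons x xs ih =>
    by_cases hx : x = j
    · subst hx; simp [List.erase_cons_head, hj]
    · rw [List.erase_cons_tail (by simp [hx])]
      by_cases hp : p x <;> simp [hp, ih]

-- A's inner loop: one remove-attempt per occurrence of j removes every 'bad' element, i.e. acts as a filter
theorem foldl_remove_filter (bad : Int → Bool) (js : List Int) :
    ∀ (u : List Int),
    (∀ v, bad v = true → u.count v ≤ js.count v) →
    js.foldl (fun u j =>
      if bad j then (if u.contains j then (PySem.List.remove? u j).getD u else u) else u) u
    = u.filter (fun v => !bad v) := by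
  induction js with
  | nil =>
    intro u h
    simp only [List.foldl_nil]
    symm
    apply List.filter_eq_self.mpr
    intro v hv
    simp only [Bool.not_eq_true']
    by_contra hb
    have := h v (by simpa using hb)
    simp [List.count_eq_zero] at this
    exact this hv
  | cons j rest ih =>
    intro u h
    simp only [List.foldl_cons]
    by_cases hj : bad j = true
    · simp only [hj, if_true]
      by_cases hmem : j ∈ u
      · rw [if_pos (by simpa using hmem),
          PySem.List.remove?_eq_some_erase u j hmem, Option.getD_some]
        rw [ih (u.erase j) ?_, filter_erase_of_not _ _ _ (by simp [hj])]
        intro v hv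
        rw [List.count_erase]
        have := h v hv
        by_cases hvj : j = v
        · subst hvj; simp only [List.count_cons_self] at this; simp; omega
        · rw [List.count_cons_of_ne hvj] at this
          simp [hvj]; omega
      · rw [if_neg (by simpa using hmem)]
        apply ih
        intro v hv
        by_cases hvj : v = j
        · subst hvj; simp [List.count_eq_zero.mpr hmem]
        · have := h v hv
          rwa [List.count_cons_of_ne (fun hh => hvj hh.symm)] at this
    · simp only [hj, Bool.false_eq_true, if_false]
      apply ih
      intro v hv
      have := h v hv
      have hvj : j ≠ v := fun hh => by subst hh; exact absurd hv hj
      rwa [List.count_cons_of_ne hvj] at this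

-- A's outer loop composes those filters
theorem outer_fold_filter (enemies : List (Int × Int)) (group : List Int) :
    ∀ (is : List Int) (u : List Int), u.Sublist group →
    is.foldl (fun u i => group.foldl (fun u j =>
      if (getEnemiesA i enemies).contains j then
        if u.contains j then (PySem.List.remove? u j).getD u else u
      else u) u) u
    = u.filter (fun v => is.all (fun i => !((getEnemiesA i enemies).contains v))) := by
  intro is
  induction is with
  | nil => intro u _; simp
  | cons i rest ih =>
    intro u hu
    simp only [List.foldl_cons]
    rw [foldl_remove_filter (fun j => (getEnemiesA i enemies).contains j) group u
      (fun v _ => hu.count_le v)]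
    rw [ih _ (List.filter_sublist.trans hu)]
    rw [List.filter_filter]
    apply List.filter_congr
    intro v _
    simp [List.all_cons, Bool.and_comm]

-- membership in B's conflicted set
theorem mem_conflicted (group : List Int) (v : Int) :
    ∀ (es : List (Int × Int)) (c : PySem.Set Int),
    (v ∈ es.foldl (fun c e =>
      if PySem.Set.contains (PySem.Set.ofList group) e.1 && PySem.Set.contains (PySem.Set.ofList group) e.2 then
        PySem.Set.add (PySem.Set.add c e.1) e.2
      else c) c)
    ↔ (v ∈ c ∨ ∃ e ∈ es, e.1 ∈ group ∧ e.2 ∈ group ∧ (v = e.1 ∨ v = e.2)) := by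
  intro es
  induction es with
  | nil => simp
  | cons e rest ih =>
    intro c
    simp only [List.foldl_cons, List.mem_cons]
    by_cases h1 : e.1 ∈ group <;> by_cases h2 : e.2 ∈ group <;>
      simp [PySem.Set.mem_ofList, h1, h2] <;> aesop

theorem main_eq (group : List Int) (enemies : List (Int × Int)) :
    getUnconflictedGroup group enemies = getUnconflictedGroup_alt group enemies := by
  unfold getUnconflictedGroup getUnconflictedGroup_alt
  rw [outer_fold_filter enemies group group group (List.Sublist.refl group)]
  apply List.filter_congr
  intro v hv
  have hiff : (∃ i ∈ group, v ∈ getEnemiesA i enemies) ↔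
      (∃ e ∈ enemies, e.1 ∈ group ∧ e.2 ∈ group ∧ (v = e.1 ∨ v = e.2)) := by
    constructor
    · rintro ⟨i, hig, hmem⟩
      rw [getEnemiesA, mem_getEnemiesA_aux] at hmem
      rcases hmem with h | ⟨e, he, ⟨h1, h2⟩ | ⟨h1, h2⟩⟩
      · simp at h
      · exact ⟨e, he, h1 ▸ hig, h2 ▸ hv, Or.inr h2.symm⟩
      · exact ⟨e, he, h2 ▸ hv, h1 ▸ hig, Or.inl h2.symm⟩
    · rintro ⟨e, he, h1, h2, hv12⟩
      rcases hv12 with h | h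
      · refine ⟨e.2, h2, ?_⟩
        rw [getEnemiesA, mem_getEnemiesA_aux]
        by_cases hq : e.1 = e.2
        · exact Or.inr ⟨e, he, Or.inl ⟨hq, (h ▸ hq.symm : e.2 = v)⟩⟩
        · exact Or.inr ⟨e, he, Or.inr ⟨rfl, h.symm⟩⟩
      · refine ⟨e.1, h1, ?_⟩
        rw [getEnemiesA, mem_getEnemiesA_aux]
        exact Or.inr ⟨e, he, Or.inl ⟨rfl, h.symm⟩⟩
  rw [show (PySem.Set.contains (enemies.foldl (fun c e =>
    if PySem.Set.contains (PySem.Set.ofList group) e.1 && PySem.Set.contains (PySem.Set.ofList group) e.2 then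
      PySem.Set.add (PySem.Set.add c e.1) e.2 else c) PySem.Set.empty) v)
    = decide (∃ e ∈ enemies, e.1 ∈ group ∧ e.2 ∈ group ∧ (v = e.1 ∨ v = e.2)) from by
      rw [Bool.eq_iff_iff]
      simp only [PySem.Set.contains_iff, decide_eq_true_eq]
      rw [mem_conflicted]
      simp [PySem.Set.empty]]
  rw [Bool.eq_iff_iff]
  simp only [List.all_eq_true, Bool.not_eq_true', decide_eq_false_iff_not]
  rw [← hiff]
  push Not
  constructor
  · intro h i hig hmem
    have := h i hig
    simp [List.contains_eq_mem] at this
    exact this hmem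
  · intro h i hig
    simp [List.contains_eq_mem]
    exact h i hig

-- ===== VERDICT (by name: the statement is the Claim_ definition above) =====
theorem getUnconflictedGroup_spec : Claim_equal_getUnconflictedGroup := by
  intro group enemies _
  unfold Spec_getUnconflictedGroup
  exact main_eq group enemies
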